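-- pv_equiv track=rewrite | github.com/vindeiatrix/mutants2 | mutants2/ui/render.py | enumerate_duplicates
-- ===== SOURCE A (Python) =====
-- NBSP = "\u00a0"  # non-breaking space
--
-- def enumerate_duplicates(items: list[str]) -> list[str]:
--     """Return ``items`` with duplicate names enumerated sequentially."""
--     seen: dict[str, int] = {}
--     out: list[str] = []
--     for name in items:
--         idx = seen.get(name, 0)
--         out.append(name if idx == 0 else f"{name}{NBSP}({idx})")
--         seen[name] = idx + 1
--     return out
-- ===== SOURCE B (Python) =====
-- NBSP = "\u00a0"  # non-breaking space
--
-- def enumerate_duplicates(items: list[str]) -> list[str]: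
--     """Return ``items`` with duplicate names enumerated sequentially.
--
--     Two staged passes: first build an index table mapping each name to the
--     ordered list of positions where it occurs, then scatter the labels back
--     into a preallocated output list, group by group.
--     """
--     positions: dict[str, list[int]] = {}
--     for i, name in enumerate(items):
--         positions.setdefault(name, []).append(i)
--     out: list[str] = [None] * len(items)
--     for name, idxs in positions.items():
--         for k, pos in enumerate(idxs):
--             out[pos] = name if k == 0 else f"{name}{NBSP}({k})"
--     return out
-- ===== Notes on version B (the rewrite author's own statement) =====
-- stated objective: alternative
-- what changed: Replaces A's single streaming pass with a running dict of counters by two staged passes: first build an index table mapping each name to the ordered list of positions where it occurs, then scatter the labels group by group into a preallocated output list.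
import Mathlib
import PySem

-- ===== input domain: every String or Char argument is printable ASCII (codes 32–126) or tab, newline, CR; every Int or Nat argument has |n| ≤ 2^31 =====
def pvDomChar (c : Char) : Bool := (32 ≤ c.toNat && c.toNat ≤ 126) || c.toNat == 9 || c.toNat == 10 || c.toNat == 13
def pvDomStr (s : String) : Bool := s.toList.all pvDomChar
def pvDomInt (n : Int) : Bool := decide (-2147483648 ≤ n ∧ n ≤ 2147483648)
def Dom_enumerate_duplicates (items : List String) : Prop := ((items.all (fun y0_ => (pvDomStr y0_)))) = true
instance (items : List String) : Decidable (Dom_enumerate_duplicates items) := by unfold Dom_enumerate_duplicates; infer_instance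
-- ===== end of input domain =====

-- B replaces A's single streaming pass (running dict of counters) by two staged passes:
-- an index table name -> ordered occurrence positions, then a scatter of the labels
-- into a preallocated output list (alternative decomposition, same cost).

def pvNBSP : String := "\u00A0"

-- ===== PORT A =====
-- the loop body of A: read the running counter, append the label, bump the counter
def pvStepA (st : PySem.Dict String Int × List String) (name : String) :
    PySem.Dict String Int × List String :=
  let idx := st.1.getD name 0
  (st.1.insert name (idx + 1),
   st.2 ++ [if idx = 0 then name else name ++ pvNBSP ++ "(" ++ PySem.Int.toStr idx ++ ")"])

def enumerate_duplicates (items : List String) : List String :=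
  (items.foldl pvStepA (PySem.Dict.empty, [])).2

-- ===== PORT B =====
-- pass 1: positions.setdefault(name, []).append(i)  ==  modify name [] (· ++ [i])
def pvGroups (items : List String) : PySem.Dict String (List Int) :=
  (PySem.List.enumerate items).foldl
    (fun d q => d.modify q.2 [] (fun l => l ++ [q.1])) PySem.Dict.empty

-- the label written for the occurrence with inner counter k
def pvLblI (name : String) (k : Int) : String :=
  if k = 0 then name else name ++ pvNBSP ++ "(" ++ PySem.Int.toStr k ++ ")"

-- one write of pass 2: out[pos] = label  (q = (k, pos) from enumerate(idxs))
def pvWrite (nm : String) (o : List (Option String)) (q : Int × Int) : List (Option String) :=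
  PySem.List.pySetD o q.2 (some (pvLblI nm q.1))

-- pass 2 inner loop: for k, pos in enumerate(idxs): out[pos] = …
def pvScatter (out : List (Option String)) (g : String × List Int) : List (Option String) :=
  (PySem.List.enumerate g.2).foldl (pvWrite g.1) out

def enumerate_duplicates_alt (items : List String) : List String :=
  let filled := (pvGroups items).items.foldl pvScatter (List.replicate items.length none)
  -- every slot has been written once; extraction of the [None]*n buffer to List String
  filled.map (fun o => o.getD "")

-- ===== PRECONDITION & SPEC =====
def Spec_enumerate_duplicates (items : List String) (out : List String) : Prop := out = enumerate_duplicates_alt items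
instance (items : List String) (out : List String) : Decidable (Spec_enumerate_duplicates items out) := by unfold Spec_enumerate_duplicates; infer_instance

-- ===== CLAIM (what is proved, stated in full; the proofs are below) =====
def Claim_equal_enumerate_duplicates : Prop := ∀ (items : List String), Dom_enumerate_duplicates items → Spec_enumerate_duplicates items (enumerate_duplicates items)

-- ===== LEMMAS AND PROOFS =====

-- the label of the occurrence of `name` that has `k` identical predecessors
def pvLbl (name : String) (k : Nat) : String := pvLblI name (k : Int)

-- reference recursion: prefix already processed on the left, suffix still to do on the right
def pvSpecGo (p : List String) : List String → List String
  | [] => []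
  | x :: r => pvLbl x (p.count x) :: pvSpecGo (p ++ [x]) r

lemma pvA_go (rest : List String) : ∀ (p : List String) (d : PySem.Dict String Int)
    (acc : List String), (∀ nm, d.getD nm 0 = (p.count nm : Int)) →
    (rest.foldl pvStepA (d, acc)).2 = acc ++ pvSpecGo p rest := by
  induction rest with
  | nil => intro p d acc _; simp [pvSpecGo]
  | cons x r ih =>
    intro p d acc h
    have hstep : pvStepA (d, acc) x
        = (d.insert x ((p.count x : Int) + 1), acc ++ [pvLbl x (p.count x)]) := by
      simp only [pvStepA, h x, pvLbl, pvLblI]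
    have hinv : ∀ nm, (d.insert x ((p.count x : Int) + 1)).getD nm 0
        = (((p ++ [x]).count nm : Nat) : Int) := by
      intro nm
      rw [PySem.Dict.getD_insert]
      by_cases hnm : nm = x
      · subst hnm; simp [List.count_append]
      · rw [if_neg hnm, h nm]
        have : [x].count nm = 0 := by
          simp [Ne.symm hnm]
        simp [List.count_append, this]
    rw [List.foldl_cons, hstep, ih (p ++ [x]) _ _ hinv]
    simp [pvSpecGo]

lemma pvA_eq (items : List String) : enumerate_duplicates items = pvSpecGo [] items := by
  unfold enumerate_duplicates
  rw [pvA_go items [] PySem.Dict.empty [] (by intro nm; simp [PySem.Dict.getD_empty])]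
  simp

-- spec recursion, snoc form
lemma pvSpecGo_snoc (r : List String) : ∀ (p : List String) (x : String),
    pvSpecGo p (r ++ [x]) = pvSpecGo p r ++ [pvLbl x ((p ++ r).count x)] := by
  induction r with
  | nil => intro p x; simp [pvSpecGo]
  | cons y r ih => intro p x; simp [pvSpecGo, ih (p ++ [y]) x]

-- the ordered list of (Int) positions of nm in items
def pvOcc (nm : String) (items : List String) : List Int :=
  ((PySem.List.enumerate items).filter (fun q => q.2 == nm)).map (fun q => q.1)

lemma pvOcc_append (nm : String) (p : List String) (x : String) :
    pvOcc nm (p ++ [x]) = pvOcc nm p ++ (if x = nm then [(p.length : Int)] else []) := by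
  unfold pvOcc
  rw [PySem.List.enumerate_append]
  simp only [PySem.List.enumerate_cons, PySem.List.enumerate_nil, List.filter_append, List.map_append]
  by_cases h : x = nm <;> simp [h]

lemma pvOcc_len (nm : String) (p : List String) : (pvOcc nm p).length = p.count nm := by
  induction p using List.reverseRecOn with
  | nil => rfl
  | append_singleton p x ih =>
      rw [pvOcc_append]
      by_cases h : x = nm <;> simp [h, ih, List.count_append]

lemma pvOcc_mem (nm : String) (p : List String) {j : Int} (h : j ∈ pvOcc nm p) :
    0 ≤ j ∧ j < (p.length : Int) := by
  unfold pvOcc at h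
  obtain ⟨q, hq, rfl⟩ := List.mem_map.mp h
  have := List.mem_of_mem_filter hq
  obtain ⟨k, hk, rfl⟩ := (PySem.List.mem_enumerate_iff _ _ _).mp this
  exact ⟨by simp, by simp; omega⟩

lemma pvGroups_getD (items : List String) (nm : String) :
    (pvGroups items).getD nm [] = pvOcc nm items := by
  have h : pvGroups items
      = ((PySem.List.enumerate items).map Prod.swap).foldl
          (fun d p => d.modify p.1 [] (fun l => l ++ [p.2])) PySem.Dict.empty := by
    rw [List.foldl_map]; rfl
  rw [h, PySem.Dict.getD_foldl_modify_append, PySem.Dict.getD_empty, List.filter_map,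
    List.map_map]
  rfl

lemma pvGroups_nodup (items : List String) : (pvGroups items).keys.Nodup := by
  exact PySem.Dict.nodup_keys_foldl_modify_key (PySem.List.enumerate items)
    (fun (q : Int × String) => q.2) [] (fun _ q l => l ++ [q.1]) _ PySem.Dict.nodup_keys_empty

lemma pvGroups_items (items : List String) :
    (pvGroups items).items = (pvGroups items).keys.map (fun nm => (nm, pvOcc nm items)) := by
  rw [PySem.Dict.items_eq_map_keys _ (pvGroups_nodup items) []]
  exact List.map_congr_left (fun nm _ => by rw [pvGroups_getD])

lemma pvGroups_snoc (p : List String) (x : String) :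
    pvGroups (p ++ [x]) = (pvGroups p).insert x (pvOcc x p ++ [(p.length : Int)]) := by
  unfold pvGroups
  rw [PySem.List.enumerate_append, List.foldl_append]
  simp only [PySem.List.enumerate_cons, PySem.List.enumerate_nil, List.foldl_cons, List.foldl_nil,
    zero_add]
  show ((pvGroups p).modify x [] (fun l => l ++ [(p.length : Int)])) = _
  show ((pvGroups p).insert x ((pvGroups p).getD x [] ++ [(p.length : Int)])) = _
  rw [pvGroups_getD]; rfl

-- pySetD within range: plain List.set, and length is preserved
lemma pvSetD_eq (o : List (Option String)) (j : Int) (v : Option String)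
    (h0 : 0 ≤ j) (h1 : j < (o.length : Int)) :
    PySem.List.pySetD o j v = o.set j.toNat v := by
  simp [PySem.List.pySetD, PySem.List.pySet?, PySem.List.pyIdx?, h0, h1]

lemma pvSetD_length (o : List (Option String)) (j : Int) (v : Option String) :
    (PySem.List.pySetD o j v).length = o.length := by
  unfold PySem.List.pySetD PySem.List.pySet?
  cases h : PySem.List.pyIdx? o.length j <;> simp

lemma pvWrite_length (nm : String) (o : List (Option String)) (q : Int × Int) :
    (pvWrite nm o q).length = o.length := pvSetD_length o q.2 _

lemma pvWrites_length (nm : String) (ps : List (Int × Int)) : ∀ (o : List (Option String)),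
    (ps.foldl (pvWrite nm) o).length = o.length := by
  induction ps with
  | nil => intro o; rfl
  | cons q ps ih => intro o; rw [List.foldl_cons, ih, pvWrite_length]

lemma pvScatter_length (o : List (Option String)) (g : String × List Int) :
    (pvScatter o g).length = o.length := pvWrites_length g.1 _ o

lemma pvScatters_length (gs : List (String × List Int)) : ∀ (o : List (Option String)),
    (gs.foldl pvScatter o).length = o.length := by
  induction gs with
  | nil => intro o; rfl
  | cons g gs ih => intro o; rw [List.foldl_cons, ih, pvScatter_length]

-- a write below the last slot commutes with appending that slot
lemma pvWrite_append (nm : String) (o : List (Option String)) (t : Option String)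
    (q : Int × Int) (h0 : 0 ≤ q.2) (h1 : q.2 < (o.length : Int)) :
    pvWrite nm (o ++ [t]) q = pvWrite nm o q ++ [t] := by
  unfold pvWrite
  rw [pvSetD_eq _ _ _ h0 (by simp; omega), pvSetD_eq _ _ _ h0 h1,
    List.set_append_left _ _ (by omega)]

lemma pvWrites_pad (nm : String) (ps : List (Int × Int)) : ∀ (o : List (Option String))
    (t : Option String), (∀ q ∈ ps, 0 ≤ q.2 ∧ q.2 < (o.length : Int)) →
    ps.foldl (pvWrite nm) (o ++ [t]) = ps.foldl (pvWrite nm) o ++ [t] := by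
  induction ps with
  | nil => intro o t _; rfl
  | cons q ps ih =>
      intro o t h
      have hq := h q (List.mem_cons_self ..)
      rw [List.foldl_cons, List.foldl_cons, pvWrite_append nm o t q hq.1 hq.2,
        ih (pvWrite nm o q) t (by intro r hr; rw [pvWrite_length]; exact h r (List.mem_cons_of_mem _ hr))]

lemma pvScatter_pad (o : List (Option String)) (t : Option String) (g : String × List Int)
    (h : ∀ j ∈ g.2, 0 ≤ j ∧ j < (o.length : Int)) :
    pvScatter (o ++ [t]) g = pvScatter o g ++ [t] := by
  unfold pvScatter
  apply pvWrites_pad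
  intro q hq
  obtain ⟨k, hk, rfl⟩ := (PySem.List.mem_enumerate_iff _ _ _).mp hq
  exact h _ (List.getElem_mem hk)

lemma pvScatters_pad (gs : List (String × List Int)) : ∀ (o : List (Option String))
    (t : Option String), (∀ g ∈ gs, ∀ j ∈ g.2, 0 ≤ j ∧ j < (o.length : Int)) →
    gs.foldl pvScatter (o ++ [t]) = gs.foldl pvScatter o ++ [t] := by
  induction gs with
  | nil => intro o t _; rfl
  | cons g gs ih =>
      intro o t h
      rw [List.foldl_cons, List.foldl_cons, pvScatter_pad o t g (h g (List.mem_cons_self ..)),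
        ih (pvScatter o g) t (by intro g' hg' j hj; rw [pvScatter_length]; exact h g' (List.mem_cons_of_mem _ hg') j hj)]

lemma pvFold_mid (x : String) (occ : List Int) (A1 A2 : List (String × List Int))
    (o : List (Option String))
    (h1 : ∀ g ∈ A1, ∀ j ∈ g.2, 0 ≤ j ∧ j < (o.length : Int))
    (h2 : ∀ g ∈ A2, ∀ j ∈ g.2, 0 ≤ j ∧ j < (o.length : Int))
    (hocc : ∀ j ∈ occ, 0 ≤ j ∧ j < (o.length : Int)) :
    (A1 ++ (x, occ ++ [(o.length : Int)]) :: A2).foldl pvScatter (o ++ [none])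
      = ((A1 ++ (x, occ) :: A2).foldl pvScatter o) ++ [some (pvLblI x (occ.length : Int))] := by
  rw [List.foldl_append, List.foldl_cons, List.foldl_append, List.foldl_cons]
  rw [pvScatters_pad A1 o none h1]
  set F1 := A1.foldl pvScatter o with hF1
  have hF1len : F1.length = o.length := pvScatters_length A1 o
  have hmid : pvScatter (F1 ++ [none]) (x, occ ++ [(o.length : Int)])
      = pvScatter F1 (x, occ) ++ [some (pvLblI x (occ.length : Int))] := by
    unfold pvScatter
    rw [show ((x, occ ++ [(o.length : Int)]) : String × List Int).2 = occ ++ [(o.length : Int)] from rfl,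
      PySem.List.enumerate_append, List.foldl_append]
    simp only [PySem.List.enumerate_cons, PySem.List.enumerate_nil, List.foldl_cons, List.foldl_nil,
      zero_add]
    rw [pvWrites_pad x (PySem.List.enumerate occ) F1 none
      (by intro q hq
          obtain ⟨k, hk, rfl⟩ := (PySem.List.mem_enumerate_iff _ _ _).mp hq
          have := hocc _ (List.getElem_mem hk)
          simpa [hF1len] using this)]
    have hWlen : (List.foldl (pvWrite x) F1 (PySem.List.enumerate occ)).length = o.length := by
      rw [pvWrites_length, hF1len]
    set W := List.foldl (pvWrite x) F1 (PySem.List.enumerate occ) with hW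
    show PySem.List.pySetD (W ++ [none]) ((o.length : Int)) (some (pvLblI x (occ.length : Int))) = _
    rw [pvSetD_eq _ _ _ (by positivity) (by simp; omega)]
    rw [List.set_append]
    simp [hWlen]
  have hb2 : ∀ g ∈ A2, ∀ j ∈ g.2, 0 ≤ j ∧ j < ((pvScatter F1 (x, occ)).length : Int) := by
    intro g hg j hj
    rw [pvScatter_length, hF1len]
    exact h2 g hg j hj
  rw [hmid, pvScatters_pad A2 _ _ hb2]

lemma pvB_snoc (p : List String) (x : String) :
    enumerate_duplicates_alt (p ++ [x])
      = enumerate_duplicates_alt p ++ [pvLbl x (p.count x)] := by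
  have hbnd : ∀ g ∈ (pvGroups p).items, ∀ j ∈ g.2,
      0 ≤ j ∧ j < ((List.replicate p.length (none : Option String)).length : Int) := by
    intro g hg j hj
    rw [pvGroups_items] at hg
    obtain ⟨nm, _, rfl⟩ := List.mem_map.mp hg
    simpa using pvOcc_mem nm p hj
  have hrepl : List.replicate (p ++ [x]).length (none : Option String)
      = List.replicate p.length (none : Option String) ++ [none] := by
    simp [List.replicate_succ']
  have hocc : ∀ j ∈ pvOcc x p,
      0 ≤ j ∧ j < ((List.replicate p.length (none : Option String)).length : Int) := by
    intro j hj; simpa using pvOcc_mem x p hj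
  have hlenr : (((List.replicate p.length (none : Option String)).length : Nat) : Int)
      = (p.length : Int) := by simp
  show ((pvGroups (p ++ [x])).items.foldl pvScatter
      (List.replicate (p ++ [x]).length none)).map (fun o => o.getD "")
    = ((pvGroups p).items.foldl pvScatter (List.replicate p.length none)).map (fun o => o.getD "")
      ++ [pvLbl x (p.count x)]
  rw [pvGroups_snoc, hrepl]
  by_cases hc : (pvGroups p).contains x = true
  · -- x already has a group: its index list is extended in place
    rw [PySem.Dict.items_insert, if_pos hc]
    have hx : x ∈ (pvGroups p).keys := (PySem.Dict.contains_iff_mem_keys _ _).mp hc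
    obtain ⟨k1, k2, hsplit⟩ := List.mem_iff_append.mp hx
    have hnd := pvGroups_nodup p
    rw [hsplit] at hnd
    have hx1 : x ∉ k1 := fun h =>
      (List.disjoint_of_nodup_append hnd) h (List.mem_cons_self ..)
    have hx2 : x ∉ k2 := by
      have := (List.nodup_cons.mp (List.Nodup.of_append_right hnd)).1
      exact this
    have hitems : (pvGroups p).items
        = (k1.map (fun nm => (nm, pvOcc nm p))) ++ (x, pvOcc x p)
            :: (k2.map (fun nm => (nm, pvOcc nm p))) := by
      rw [pvGroups_items p, hsplit]
      simp
    rw [hitems]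
    have hmap : List.map (fun e => if (e.1 == x) = true then (x, pvOcc x p ++ [(p.length : Int)]) else e)
          ((k1.map (fun nm => (nm, pvOcc nm p))) ++ (x, pvOcc x p)
            :: (k2.map (fun nm => (nm, pvOcc nm p))))
        = (k1.map (fun nm => (nm, pvOcc nm p)))
            ++ (x, pvOcc x p ++ [((List.replicate p.length (none : Option String)).length : Int)])
            :: (k2.map (fun nm => (nm, pvOcc nm p))) := by
      rw [List.map_append, List.map_cons]
      congr 1
      · rw [List.map_map]
        apply List.map_congr_left
        intro nm hnm
        have : nm ≠ x := fun h => hx1 (h ▸ hnm)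
        simp [this]
      · congr 1
        · simp
        · rw [List.map_map]
          apply List.map_congr_left
          intro nm hnm
          have : nm ≠ x := fun h => hx2 (h ▸ hnm)
          simp [this]
    rw [hmap]
    have hb1 : ∀ g ∈ k1.map (fun nm => (nm, pvOcc nm p)), ∀ j ∈ g.2,
        0 ≤ j ∧ j < ((List.replicate p.length (none : Option String)).length : Int) := by
      intro g hg j hj
      obtain ⟨nm, _, rfl⟩ := List.mem_map.mp hg
      simpa using pvOcc_mem nm p hj
    have hb2 : ∀ g ∈ k2.map (fun nm => (nm, pvOcc nm p)), ∀ j ∈ g.2,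
        0 ≤ j ∧ j < ((List.replicate p.length (none : Option String)).length : Int) := by
      intro g hg j hj
      obtain ⟨nm, _, rfl⟩ := List.mem_map.mp hg
      simpa using pvOcc_mem nm p hj
    rw [pvFold_mid x (pvOcc x p) _ _ _ hb1 hb2 hocc, List.map_append]
    have hcnt : ((pvOcc x p).length : Int) = ((p.count x : Nat) : Int) := by
      rw [pvOcc_len]
    rw [hcnt]
    simp [pvLbl]
  · -- x is new: its group is appended at the end, and pvOcc x p = []
    have hocc0 : pvOcc x p = [] := by
      rw [← pvGroups_getD, PySem.Dict.getD_of_not_contains]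
      simpa using hc
    rw [PySem.Dict.items_insert, if_neg hc]
    have : (pvGroups p).items ++ [(x, pvOcc x p ++ [(p.length : Int)])]
        = (pvGroups p).items ++ (x, pvOcc x p ++ [((List.replicate p.length (none : Option String)).length : Int)]) :: [] := by
      simp
    rw [this, pvFold_mid x (pvOcc x p) _ [] _ hbnd (by simp) hocc]
    rw [List.foldl_append]
    simp only [List.foldl_cons, List.foldl_nil, hocc0]
    have hscat : pvScatter ((pvGroups p).items.foldl pvScatter
        (List.replicate p.length none)) (x, ([] : List Int)) =
        (pvGroups p).items.foldl pvScatter (List.replicate p.length none) := by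
      simp [pvScatter, PySem.List.enumerate_nil]
    rw [hscat, List.map_append]
    have hcnt : p.count x = 0 := by rw [← pvOcc_len x p, hocc0]; rfl
    simp [hcnt, pvLbl]

lemma pvB_eq (items : List String) : enumerate_duplicates_alt items = pvSpecGo [] items := by
  induction items using List.reverseRecOn with
  | nil => rfl
  | append_singleton p x ih =>
      rw [pvB_snoc, ih, pvSpecGo_snoc]
      simp

-- ===== VERDICT (by name: the statement is the Claim_ definition above) =====
theorem enumerate_duplicates_spec : Claim_equal_enumerate_duplicates := by
  intro items _
  unfold Spec_enumerate_duplicates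
  rw [pvA_eq, pvB_eq]
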